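-- pv_equiv track=rewrite | github.com/iyngr/ci-mock | backend/routers/live_interview.py | validate_context_integrity
-- ===== SOURCE A (Python) =====
-- from typing import Any, Dict, List, Optional
--
-- CONTEXT_HIJACK_PATTERNS = [
--     "interrupt", "stop", "break", "switch", "change topic",
--     "new question", "different question", "meta", "outside",
--     "real world", "personal", "tell me about yourself"
-- ]
--
-- def validate_context_integrity(text: str, context: Optional[Dict[str, Any]] = None) -> bool:
--     """Validate that input stays within assessment context boundaries"""
--     if not text:
--         return True
--
--     lower_text = text.lower()
--
--     # Check for context hijacking attempts
--     for pattern in CONTEXT_HIJACK_PATTERNS: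
--         if pattern in lower_text:
--             return False
--
--     # Check for attempts to break out of technical assessment
--     off_topic_patterns = [
--         "personal life", "your opinion", "what do you think",
--         "tell me about", "chat about", "discuss",
--         "off topic", "change subject", "something else"
--     ]
--
--     for pattern in off_topic_patterns:
--         if pattern in lower_text:
--             return False
--
--     return True
-- ===== SOURCE B (Python) =====
-- from typing import Any, Dict, Optional
--
-- # All forbidden literal patterns merged into one tuple (none is empty).
-- _ALL_PATTERNS = (
--     "interrupt", "stop", "break", "switch", "change topic",
--     "new question", "different question", "meta", "outside",
--     "real world", "personal", "tell me about yourself",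
--     "personal life", "your opinion", "what do you think",
--     "tell me about", "chat about", "discuss",
--     "off topic", "change subject", "something else",
-- )
--
-- def validate_context_integrity(text: str, context: Optional[Dict[str, Any]] = None) -> bool:
--     """Validate that input stays within assessment context boundaries.
--
--     Single left-to-right pass over the text: at each position test whether
--     any forbidden pattern starts there (instead of one substring scan per pattern).
--     """
--     if not text:
--         return True
--     t = text.lower()
--     for i in range(len(t)):
--         if any(t.startswith(p, i) for p in _ALL_PATTERNS):
--             return False
--     return True
-- ===== Notes on version B (the rewrite author's own statement) =====
-- stated objective: alternative
-- what changed: B merges both pattern lists and makes a single left-to-right pass over the text, testing at each position whether any pattern starts there, instead of A's one full substring scan per pattern over two separate lists.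
import Mathlib
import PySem

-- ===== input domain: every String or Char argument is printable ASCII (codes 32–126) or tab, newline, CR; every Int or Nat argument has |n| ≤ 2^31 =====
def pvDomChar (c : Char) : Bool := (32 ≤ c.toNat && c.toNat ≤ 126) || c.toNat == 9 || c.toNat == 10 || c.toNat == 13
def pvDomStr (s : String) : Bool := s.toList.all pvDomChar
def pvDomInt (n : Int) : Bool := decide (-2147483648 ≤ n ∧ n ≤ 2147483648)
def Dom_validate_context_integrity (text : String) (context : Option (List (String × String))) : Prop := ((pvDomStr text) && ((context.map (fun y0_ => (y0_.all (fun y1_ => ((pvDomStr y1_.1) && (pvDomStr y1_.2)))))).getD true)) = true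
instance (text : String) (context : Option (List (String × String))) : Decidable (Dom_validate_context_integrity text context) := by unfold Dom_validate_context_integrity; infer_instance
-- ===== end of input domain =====

-- B replaces A's one-substring-scan-per-pattern (over two lists) by a single
-- left-to-right pass testing all merged patterns at each position (objective: alternative).

-- ===== PORT A =====
def CONTEXT_HIJACK_PATTERNS : List String :=
  ["interrupt", "stop", "break", "switch", "change topic",
   "new question", "different question", "meta", "outside",
   "real world", "personal", "tell me about yourself"]

def off_topic_patterns : List String :=
  ["personal life", "your opinion", "what do you think",
   "tell me about", "chat about", "discuss",
   "off topic", "change subject", "something else"]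

def validate_context_integrity (text : String) (context : Option (List (String × String))) : Bool :=
  if text.toList.isEmpty then true
  else
    let lower_text := PySem.Chars.lower text.toList
    if CONTEXT_HIJACK_PATTERNS.any (fun p => PySem.Chars.isIn p.toList lower_text) then false
    else if off_topic_patterns.any (fun p => PySem.Chars.isIn p.toList lower_text) then false
    else true

-- ===== PORT B =====
def allPatterns : List String :=
  ["interrupt", "stop", "break", "switch", "change topic",
   "new question", "different question", "meta", "outside",
   "real world", "personal", "tell me about yourself",
   "personal life", "your opinion", "what do you think",
   "tell me about", "chat about", "discuss",
   "off topic", "change subject", "something else"]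

-- the loop 'for i in range(len(t)): if any(t.startswith(p, i) ...)' as recursion on suffixes
def scanSuffixes (ps : List (List Char)) : List Char → Bool
  | [] => false
  | c :: rest => (ps.any fun p => PySem.Chars.startswith (c :: rest) p) || scanSuffixes ps rest

def validate_context_integrity_alt (text : String) (context : Option (List (String × String))) : Bool :=
  if text.toList.isEmpty then true
  else !(scanSuffixes (allPatterns.map String.toList) (PySem.Chars.lower text.toList))

-- ===== PRECONDITION & SPEC =====
def Spec_validate_context_integrity (text : String) (context : Option (List (String × String))) (out : Bool) : Prop := out = validate_context_integrity_alt text context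
instance (text : String) (context : Option (List (String × String))) (out : Bool) : Decidable (Spec_validate_context_integrity text context out) := by unfold Spec_validate_context_integrity; infer_instance

-- ===== CLAIM (what is proved, stated in full; the proofs are below) =====
def Claim_equal_validate_context_integrity : Prop := ∀ (text : String) (context : Option (List (String × String))), Dom_validate_context_integrity text context → Spec_validate_context_integrity text context (validate_context_integrity text context)

-- ===== LEMMAS AND PROOFS =====

-- the positional scan finds exactly the patterns that occur as an infix (patterns nonempty)
theorem scanSuffixes_eq_any_isIn (ps : List (List Char)) (cs : List Char)
    (hne : ∀ p ∈ ps, p ≠ []) :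
    scanSuffixes ps cs = ps.any (fun p => PySem.Chars.isIn p cs) := by
  induction cs with
  | nil =>
    simp only [scanSuffixes]
    rw [Bool.eq_iff_iff]
    simp only [List.any_eq_true, PySem.Chars.isIn_iff_infix, List.infix_nil]
    constructor
    · intro h; cases h
    · rintro ⟨p, hp, hpe⟩; exact absurd hpe (hne p hp)
  | cons c rest ih =>
    simp only [scanSuffixes, ih]
    rw [Bool.eq_iff_iff]
    simp only [Bool.or_eq_true, List.any_eq_true, PySem.Chars.startswith_iff,
      PySem.Chars.isIn_iff_infix, List.infix_cons_iff]
    constructor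
    · rintro (⟨p, hp, h⟩ | ⟨p, hp, h⟩)
      · exact ⟨p, hp, Or.inl h⟩
      · exact ⟨p, hp, Or.inr h⟩
    · rintro ⟨p, hp, h | h⟩
      · exact Or.inl ⟨p, hp, h⟩
      · exact Or.inr ⟨p, hp, h⟩

theorem allPatterns_split :
    allPatterns.map String.toList =
      CONTEXT_HIJACK_PATTERNS.map String.toList ++ off_topic_patterns.map String.toList := by
  decide

theorem allPatterns_nonempty : ∀ p ∈ allPatterns.map String.toList, p ≠ [] := by decide

-- ===== VERDICT (by name: the statement is the Claim_ definition above) =====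
theorem validate_context_integrity_spec : Claim_equal_validate_context_integrity := by
  intro text context _
  unfold Spec_validate_context_integrity validate_context_integrity validate_context_integrity_alt
  by_cases h : text.toList.isEmpty
  · simp [h]
  · simp only [h]
    rw [scanSuffixes_eq_any_isIn _ _ allPatterns_nonempty, allPatterns_split, List.any_append]
    rcases h1 : CONTEXT_HIJACK_PATTERNS.any (fun p => PySem.Chars.isIn p.toList (PySem.Chars.lower text.toList)) with _ | _ <;>
    rcases h2 : off_topic_patterns.any (fun p => PySem.Chars.isIn p.toList (PySem.Chars.lower text.toList)) with _ | _ <;>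
    simp_all [List.any_map, Function.comp_def]
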